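-- pv_equiv track=rewrite | github.com/amunc/RIASC_Removing_Redundancies_Tools | RTRR_tool/RTRR_scripts/utilities_redundancy_t3.py | obtener_lista_variables_redundantes
-- ===== SOURCE A (Python) =====
-- def obtener_lista_variables_redundantes(lista_listas_nombres_redundantes_individuales,lista_listas_nombres_redundantes_vectoriales,diccionario_nombres_apellidos_inicial,separador_nombre_apellido_original):
--     lista_variables_redundantes = []
--
--     for lista in lista_listas_nombres_redundantes_individuales:
--         lista = sorted(lista)
--         for indice in range(1,len(lista)): # nos quedamos con el primero
--             nombre_completo = lista[indice]
--             lista_variables_redundantes.append(nombre_completo)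
--
--     for lista in lista_listas_nombres_redundantes_vectoriales:
--         lista = sorted(lista)
--         for indice in range(1,len(lista)): # nos quedamos con el primero
--             nombre_buscado = lista[indice]
--             lista_completa_apellidos = diccionario_nombres_apellidos_inicial[nombre_buscado]
--             for apellido in lista_completa_apellidos:
--                 nombre_completo = nombre_buscado + separador_nombre_apellido_original + apellido
--                 lista_variables_redundantes.append(nombre_completo)
--
--     return sorted(lista_variables_redundantes)
-- ===== SOURCE B (Python) =====
-- def obtener_lista_variables_redundantes(lista_listas_nombres_redundantes_individuales, lista_listas_nombres_redundantes_vectoriales, diccionario_nombres_apellidos_inicial, separador_nombre_apellido_original):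
--     redundantes = []
--     for grupo in lista_listas_nombres_redundantes_individuales:
--         if grupo:
--             resto = list(grupo)
--             resto.remove(min(resto))
--             redundantes.extend(resto)
--     for grupo in lista_listas_nombres_redundantes_vectoriales:
--         if grupo:
--             resto = list(grupo)
--             resto.remove(min(resto))
--             for nombre in resto:
--                 for apellido in diccionario_nombres_apellidos_inicial[nombre]:
--                     redundantes.append(nombre + separador_nombre_apellido_original + apellido)
--     return sorted(redundantes)
-- ===== Notes on version B (the rewrite author's own statement) =====
-- stated objective: alternative
-- what changed: Per group, B removes one occurrence of the group minimum found by a single min-scan and keeps the remainder in original order, instead of A's sort-then-slice sorted(lista)[1:]; one final sorted() call as before.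
import Mathlib
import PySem

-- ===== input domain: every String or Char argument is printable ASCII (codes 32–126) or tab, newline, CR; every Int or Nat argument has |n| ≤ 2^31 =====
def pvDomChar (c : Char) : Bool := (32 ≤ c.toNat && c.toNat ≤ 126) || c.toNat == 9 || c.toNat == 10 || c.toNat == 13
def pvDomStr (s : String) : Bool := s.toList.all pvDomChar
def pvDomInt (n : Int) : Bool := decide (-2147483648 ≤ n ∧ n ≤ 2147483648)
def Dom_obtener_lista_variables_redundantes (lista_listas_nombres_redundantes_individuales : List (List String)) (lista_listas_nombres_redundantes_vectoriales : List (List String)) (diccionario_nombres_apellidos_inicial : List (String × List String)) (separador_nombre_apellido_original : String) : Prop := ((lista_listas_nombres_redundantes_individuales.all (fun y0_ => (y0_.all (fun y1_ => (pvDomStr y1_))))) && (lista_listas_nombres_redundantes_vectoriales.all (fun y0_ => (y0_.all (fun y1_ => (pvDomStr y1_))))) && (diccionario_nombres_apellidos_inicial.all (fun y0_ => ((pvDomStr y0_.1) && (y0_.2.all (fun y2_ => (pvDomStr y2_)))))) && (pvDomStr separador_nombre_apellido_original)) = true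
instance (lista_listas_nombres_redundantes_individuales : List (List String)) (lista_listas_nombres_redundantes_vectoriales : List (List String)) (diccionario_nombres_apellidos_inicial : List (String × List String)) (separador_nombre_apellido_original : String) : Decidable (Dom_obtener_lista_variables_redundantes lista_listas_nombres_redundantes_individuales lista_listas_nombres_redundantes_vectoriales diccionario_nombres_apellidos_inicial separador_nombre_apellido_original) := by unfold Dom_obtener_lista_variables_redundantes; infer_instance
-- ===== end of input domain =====

-- B replaces A's per-group sort-then-slice by a min-scan that removes one copy of the
-- minimum and keeps the rest in original order (alternative decomposition; one final sort).

-- ===== PORT A =====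
-- Literal transliteration of A: per group, sort, then index loop over range(1, len)
-- appending lista[indice]; for vectorial groups, dict lookup (getD [] only reachable
-- outside Pre_, where Python raises KeyError) and inner append loop; final sorted().
def obtener_lista_variables_redundantes (lista_listas_nombres_redundantes_individuales : List (List String)) (lista_listas_nombres_redundantes_vectoriales : List (List String)) (diccionario_nombres_apellidos_inicial : List (String × List String)) (separador_nombre_apellido_original : String) : List String :=
  PySem.List.sorted
    (lista_listas_nombres_redundantes_vectoriales.foldl (fun acc lista =>
        (PySem.List.pyRange 1 (PySem.List.sorted lista (fun x => x) false).length 1).foldl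
          (fun acc indice =>
            ((List.lookup (PySem.List.pyGetD (PySem.List.sorted lista (fun x => x) false) indice "") diccionario_nombres_apellidos_inicial).getD []).foldl
              (fun acc apellido =>
                acc ++ [PySem.List.pyGetD (PySem.List.sorted lista (fun x => x) false) indice "" ++ separador_nombre_apellido_original ++ apellido]) acc) acc)
      (lista_listas_nombres_redundantes_individuales.foldl (fun acc lista =>
          (PySem.List.pyRange 1 (PySem.List.sorted lista (fun x => x) false).length 1).foldl
            (fun acc indice =>
              acc ++ [PySem.List.pyGetD (PySem.List.sorted lista (fun x => x) false) indice ""]) acc)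
        ([] : List String)))
    (fun x => x) false

-- ===== PORT B =====
-- Literal transliteration of B: per non-empty group, remove one occurrence of min
-- (remove? + erase), extend with the remainder; expand vectorial names through the
-- dict (getD [] only reachable outside Pre_, where Python raises KeyError); one sort.
def obtener_lista_variables_redundantes_alt (lista_listas_nombres_redundantes_individuales : List (List String)) (lista_listas_nombres_redundantes_vectoriales : List (List String)) (diccionario_nombres_apellidos_inicial : List (String × List String)) (separador_nombre_apellido_original : String) : List String :=
  PySem.List.sorted
    (lista_listas_nombres_redundantes_vectoriales.foldl (fun acc grupo =>
        match PySem.List.min? grupo (fun x => x) with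
        | none => acc
        | some m =>
          ((PySem.List.remove? grupo m).getD []).foldl (fun acc nombre =>
            acc ++ (((List.lookup nombre diccionario_nombres_apellidos_inicial).getD []).map
              (fun apellido => nombre ++ separador_nombre_apellido_original ++ apellido))) acc)
      (lista_listas_nombres_redundantes_individuales.foldl (fun acc grupo =>
          match PySem.List.min? grupo (fun x => x) with
          | none => acc
          | some m => acc ++ ((PySem.List.remove? grupo m).getD []))
        ([] : List String)))
    (fun x => x) false

-- ===== PRECONDITION & SPEC =====
-- Pre_ excludes exactly the inputs where Python A raises KeyError: some looked-up
-- vectorial name (every group member except one copy of the group minimum) is not a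
-- key of the dictionary. (B raises the same KeyError there.)
def Pre_obtener_lista_variables_redundantes (lista_listas_nombres_redundantes_individuales : List (List String)) (lista_listas_nombres_redundantes_vectoriales : List (List String)) (diccionario_nombres_apellidos_inicial : List (String × List String)) (separador_nombre_apellido_original : String) : Prop :=
  ∀ l ∈ lista_listas_nombres_redundantes_vectoriales, ∀ x ∈ l,
    (List.lookup x diccionario_nombres_apellidos_inicial).isSome = true ∨
    (l.count x = 1 ∧ ∀ y ∈ l, x ≤ y)
instance (lista_listas_nombres_redundantes_individuales : List (List String)) (lista_listas_nombres_redundantes_vectoriales : List (List String)) (diccionario_nombres_apellidos_inicial : List (String × List String)) (separador_nombre_apellido_original : String) : Decidable (Pre_obtener_lista_variables_redundantes lista_listas_nombres_redundantes_individuales lista_listas_nombres_redundantes_vectoriales diccionario_nombres_apellidos_inicial separador_nombre_apellido_original) := by unfold Pre_obtener_lista_variables_redundantes; infer_instance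

def pvWitness_obtener_lista_variables_redundantes : List (List String) × List (List String) × (List (String × List String)) × String :=
  ([["b", "a", "c"]], [["x", "y", "x"]], [("x", ["p", "q"]), ("y", ["r"])], "_")

def Spec_obtener_lista_variables_redundantes (lista_listas_nombres_redundantes_individuales : List (List String)) (lista_listas_nombres_redundantes_vectoriales : List (List String)) (diccionario_nombres_apellidos_inicial : List (String × List String)) (separador_nombre_apellido_original : String) (out : List String) : Prop := out = obtener_lista_variables_redundantes_alt lista_listas_nombres_redundantes_individuales lista_listas_nombres_redundantes_vectoriales diccionario_nombres_apellidos_inicial separador_nombre_apellido_original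
instance (lista_listas_nombres_redundantes_individuales : List (List String)) (lista_listas_nombres_redundantes_vectoriales : List (List String)) (diccionario_nombres_apellidos_inicial : List (String × List String)) (separador_nombre_apellido_original : String) (out : List String) : Decidable (Spec_obtener_lista_variables_redundantes lista_listas_nombres_redundantes_individuales lista_listas_nombres_redundantes_vectoriales diccionario_nombres_apellidos_inicial separador_nombre_apellido_original out) := by unfold Spec_obtener_lista_variables_redundantes; infer_instance

-- ===== CLAIM (what is proved, stated in full; the proofs are below) =====
def Claim_equal_obtener_lista_variables_redundantes : Prop := ∀ (lista_listas_nombres_redundantes_individuales : List (List String)) (lista_listas_nombres_redundantes_vectoriales : List (List String)) (diccionario_nombres_apellidos_inicial : List (String × List String)) (separador_nombre_apellido_original : String), Dom_obtener_lista_variables_redundantes lista_listas_nombres_redundantes_individuales lista_listas_nombres_redundantes_vectoriales diccionario_nombres_apellidos_inicial separador_nombre_apellido_original → Pre_obtener_lista_variables_redundantes lista_listas_nombres_redundantes_individuales lista_listas_nombres_redundantes_vectoriales diccionario_nombres_apellidos_inicial separador_nombre_apellido_original → Spec_obtener_lista_variables_redundantes lista_listas_nombres_redundantes_individuales lista_listas_nombres_redundantes_vectoriales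 diccionario_nombres_apellidos_inicial separador_nombre_apellido_original (obtener_lista_variables_redundantes lista_listas_nombres_redundantes_individuales lista_listas_nombres_redundantes_vectoriales diccionario_nombres_apellidos_inicial separador_nombre_apellido_original)

-- ===== LEMMAS AND PROOFS =====

-- proof-side abbreviations (used only by the proofs)
def pvExp (dicc : List (String × List String)) (sep : String) (n : String) : List String :=
  ((List.lookup n dicc).getD []).map (fun apellido => n ++ sep ++ apellido)

def pvFA (l : List String) : List String := (PySem.List.sorted l (fun x => x) false).drop 1

def pvFB (l : List String) : List String :=
  match PySem.List.min? l (fun x => x) with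
  | none => []
  | some m => l.erase m

-- append-only foldl is acc ++ flatMap
theorem pv_foldl_append {α β : Type} (g : α → List β) (l : List α) (acc : List β) :
    l.foldl (fun a x => a ++ g x) acc = acc ++ l.flatMap g := by
  induction l generalizing acc with
  | nil => simp
  | cons x t ih => simp [List.foldl_cons, ih]

-- A collects the sorted group minus its head; B the group minus one copy of its
-- minimum: permutations of each other
theorem pv_group_perm (l : List String) : (pvFA l).Perm (pvFB l) := by
  cases hm : PySem.List.min? l (fun x => x) with
  | none =>
    have hl : l = [] := (PySem.List.min?_eq_none_iff l (fun x => x)).mp hm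
    subst hl
    have hnil : PySem.List.sorted ([] : List String) (fun x => x) false = [] := rfl
    simp [pvFA, pvFB, hm, hnil]
  | some m =>
    have hperm : (PySem.List.sorted l (fun x => x) false).Perm l :=
      PySem.List.sorted_perm l (fun x => x) false
    cases hs : PySem.List.sorted l (fun x => x) false with
    | nil =>
      have hl : l = [] := by
        rw [hs] at hperm
        exact hperm.symm.eq_nil
      subst hl
      rw [(PySem.List.min?_eq_none_iff [] (fun x => x)).mpr rfl] at hm
      exact absurd hm (by simp)
    | cons h t =>
      have hperm' : (h :: t).Perm l := hs ▸ hperm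
      have hhl : h ∈ l := hperm'.mem_iff.mp (by simp)
      have hml : m ∈ l := PySem.List.min?_mem hm
      have h1 : m ≤ h := PySem.List.min?_isMin hm h hhl
      have h2 : h ≤ m := PySem.List.key_head_sorted_le l (fun x => x) hs m hml
      have heq : h = m := le_antisymm h2 h1
      subst heq
      have herase : ((h :: t).erase h).Perm (l.erase h) := hperm'.erase h
      simp only [List.erase_cons_head] at herase
      simpa [pvFA, pvFB, hm, hs] using herase

theorem pv_flatMap_perm {α β : Type} (f g : α → List β) (l : List α)
    (h : ∀ x ∈ l, (f x).Perm (g x)) : (l.flatMap f).Perm (l.flatMap g) := by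
  induction l with
  | nil => simp
  | cons x t ih =>
    simp only [List.flatMap_cons]
    exact (h x (by simp)).append (ih (fun y hy => h y (List.mem_cons_of_mem _ hy)))

-- closed form of port A
theorem pv_flatMap_single {α β : Type} (f : α → β) (l : List α) :
    (l.flatMap fun x => [f x]) = l.map f := by
  induction l with
  | nil => rfl
  | cons x t ih => simp [List.flatMap_cons, ih]

theorem pv_A_inner (lista : List String) (acc : List String) :
    (PySem.List.pyRange 1 (PySem.List.sorted lista (fun x => x) false).length 1).foldl
      (fun acc indice => acc ++ [PySem.List.pyGetD (PySem.List.sorted lista (fun x => x) false) indice ""]) acc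
    = acc ++ pvFA lista := by
  rw [PySem.List.foldl_pyRange_pyGetD' (xs := PySem.List.sorted lista (fun x => x) false)
      (d := "") (f := fun (a : List String) (x : String) => a ++ [x]) (init := acc) (by norm_num)]
  rw [pv_foldl_append (g := fun (x : String) => [x])]
  simp [pvFA]

theorem pv_A_inner_vect (dicc : List (String × List String)) (sep : String)
    (lista : List String) (acc : List String) :
    (PySem.List.pyRange 1 (PySem.List.sorted lista (fun x => x) false).length 1).foldl
      (fun acc indice =>
        ((List.lookup (PySem.List.pyGetD (PySem.List.sorted lista (fun x => x) false) indice "") dicc).getD []).foldl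
          (fun acc apellido =>
            acc ++ [PySem.List.pyGetD (PySem.List.sorted lista (fun x => x) false) indice "" ++ sep ++ apellido]) acc) acc
    = acc ++ (pvFA lista).flatMap (pvExp dicc sep) := by
  have hin : ∀ (a : List String) (n : String),
      ((List.lookup n dicc).getD []).foldl (fun acc apellido => acc ++ [n ++ sep ++ apellido]) a
      = a ++ pvExp dicc sep n := by
    intro a n
    rw [pv_foldl_append (g := fun apellido => [n ++ sep ++ apellido])]
    rw [pv_flatMap_single]
    rfl
  simp only [hin]
  rw [PySem.List.foldl_pyRange_pyGetD' (xs := PySem.List.sorted lista (fun x => x) false)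
      (d := "") (f := fun (a : List String) (n : String) => a ++ pvExp dicc sep n) (init := acc) (by norm_num)]
  rw [pv_foldl_append (g := pvExp dicc sep)]
  rfl

theorem pv_A_closed (ind vect : List (List String)) (dicc : List (String × List String)) (sep : String) :
    obtener_lista_variables_redundantes ind vect dicc sep
    = PySem.List.sorted
        (ind.flatMap pvFA ++ vect.flatMap (fun l => (pvFA l).flatMap (pvExp dicc sep)))
        (fun x => x) false := by
  unfold obtener_lista_variables_redundantes
  rw [PySem.List.foldl_congr_mem vect _
      (fun acc lista => acc ++ (pvFA lista).flatMap (pvExp dicc sep)) _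
      (fun acc lista _ => pv_A_inner_vect dicc sep lista acc)]
  rw [PySem.List.foldl_congr_mem ind _
      (fun acc lista => acc ++ pvFA lista) _
      (fun acc lista _ => pv_A_inner lista acc)]
  rw [pv_foldl_append, pv_foldl_append]
  simp

-- closed form of port B
theorem pv_B_one (grupo : List String) (acc : List String) :
    (match PySem.List.min? grupo (fun x => x) with
     | none => acc
     | some m => acc ++ ((PySem.List.remove? grupo m).getD []))
    = acc ++ pvFB grupo := by
  cases hm : PySem.List.min? grupo (fun x => x) with
  | none => simp [pvFB, hm]
  | some m =>
    show acc ++ (PySem.List.remove? grupo m).getD [] = acc ++ pvFB grupo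
    rw [PySem.List.remove?_eq_some_erase grupo m (PySem.List.min?_mem hm)]
    simp [pvFB, hm]

theorem pv_B_one_vect (dicc : List (String × List String)) (sep : String)
    (grupo : List String) (acc : List String) :
    (match PySem.List.min? grupo (fun x => x) with
     | none => acc
     | some m =>
       ((PySem.List.remove? grupo m).getD []).foldl (fun acc nombre =>
         acc ++ (((List.lookup nombre dicc).getD []).map
           (fun apellido => nombre ++ sep ++ apellido))) acc)
    = acc ++ (pvFB grupo).flatMap (pvExp dicc sep) := by
  cases hm : PySem.List.min? grupo (fun x => x) with
  | none => simp [pvFB, hm]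
  | some m =>
    show ((PySem.List.remove? grupo m).getD []).foldl _ acc
         = acc ++ (pvFB grupo).flatMap (pvExp dicc sep)
    rw [PySem.List.remove?_eq_some_erase grupo m (PySem.List.min?_mem hm)]
    simp only [Option.getD_some, pvFB, hm]
    exact pv_foldl_append (g := pvExp dicc sep) (grupo.erase m) acc

theorem pv_B_closed (ind vect : List (List String)) (dicc : List (String × List String)) (sep : String) :
    obtener_lista_variables_redundantes_alt ind vect dicc sep
    = PySem.List.sorted
        (ind.flatMap pvFB ++ vect.flatMap (fun l => (pvFB l).flatMap (pvExp dicc sep)))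
        (fun x => x) false := by
  unfold obtener_lista_variables_redundantes_alt
  rw [PySem.List.foldl_congr_mem vect _
      (fun acc grupo => acc ++ (pvFB grupo).flatMap (pvExp dicc sep)) _
      (fun acc grupo _ => pv_B_one_vect dicc sep grupo acc)]
  rw [PySem.List.foldl_congr_mem ind _
      (fun acc grupo => acc ++ pvFB grupo) _
      (fun acc grupo _ => pv_B_one grupo acc)]
  rw [pv_foldl_append, pv_foldl_append]
  simp

-- ===== VERDICT (by name: the statement is the Claim_ definition above) =====
theorem obtener_lista_variables_redundantes_spec : Claim_equal_obtener_lista_variables_redundantes := by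
  intro ind vect dicc sep _hdom _hpre
  unfold Spec_obtener_lista_variables_redundantes
  rw [pv_A_closed, pv_B_closed]
  exact (PySem.List.sorted_id_eq_sorted_id_iff_perm _ _).mpr
    ((pv_flatMap_perm _ _ _ (fun l _ => pv_group_perm l)).append
     (pv_flatMap_perm _ _ _ (fun l _ =>
        List.Perm.flatMap (pv_group_perm l) (fun a _ => List.Perm.refl _))))
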